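-- pv_equiv track=rewrite | github.com/The-Turtle/AdventOfCode2025 | day6/main.py | easy_puzzle
-- ===== SOURCE A (Python) =====
-- def product(arr):
--     prod = 1
--     for n in arr:
--         prod *= n
--     return prod
--
-- def easy_puzzle(char_array):
--     num_2d_array = []
--     for line in char_array[:-1]:
--         line_str = ''.join(line)
--         num_strs = line_str.split()
--         nums = [int(s) for s in num_strs]
--         num_2d_array.append(nums)
--     operations = [c for c in char_array[-1] if c != ' ']
--     answer = 0
--     for i, op in enumerate(operations):
--         col = [row[i] for row in num_2d_array]
--         if op == '+':
--             answer += sum(col)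
--         elif op == '*':
--             answer += product(col)
--     return answer
-- ===== SOURCE B (Python) =====
-- def easy_puzzle(char_array):
--     ops = [c for c in char_array[-1] if c != ' ']
--     acc = [0 if op == '+' else 1 for op in ops]
--     for line in char_array[:-1]:
--         nums = [int(s) for s in ''.join(line).split()]
--         acc = [a + nums[i] if op == '+' else a * nums[i] if op == '*' else a
--                for i, (a, op) in enumerate(zip(acc, ops))]
--     return sum(a for a, op in zip(acc, ops) if op in ('+', '*'))
-- ===== Notes on version B (the rewrite author's own statement) =====
-- stated objective: alternative
-- what changed: Replaces the per-operation column gather (rebuilding each column list from all rows and reducing it) with a single streaming row-by-row pass that keeps one running accumulator per column (0 for '+', 1 for '*') and finally sums the accumulators of the '+'/'*' columns.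
import Mathlib
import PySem

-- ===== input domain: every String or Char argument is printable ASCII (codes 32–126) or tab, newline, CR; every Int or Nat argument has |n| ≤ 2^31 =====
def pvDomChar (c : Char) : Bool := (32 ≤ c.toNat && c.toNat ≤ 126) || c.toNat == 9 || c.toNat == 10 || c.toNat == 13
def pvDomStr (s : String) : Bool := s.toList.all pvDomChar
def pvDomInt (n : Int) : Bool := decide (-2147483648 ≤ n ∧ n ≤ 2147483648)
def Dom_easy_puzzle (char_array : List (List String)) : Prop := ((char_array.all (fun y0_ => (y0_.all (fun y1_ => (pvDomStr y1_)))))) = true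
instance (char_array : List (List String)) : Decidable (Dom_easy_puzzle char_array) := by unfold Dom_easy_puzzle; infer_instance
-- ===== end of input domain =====

-- B replaces A's per-operation column gather with a streaming per-column accumulation
-- over the rows (alternative decomposition, same asymptotic cost).

-- ===== PORT A =====
def pyProduct (arr : List Int) : Int := arr.foldl (fun prod n => prod * n) 1

def easy_puzzle (char_array : List (List String)) : Int :=
  let num_2d_array : List (List Int) :=
    (PySem.List.slice char_array none (some (-1))).foldl
      (fun acc line =>
        let line_str := PySem.Str.join "" line
        let num_strs := PySem.Str.split₀ line_str
        let nums := num_strs.map (fun s => (PySem.Int.ofStr? s).getD 0)  -- int(s); Pre_ makes it parse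
        acc ++ [nums]) []
  let operations := ((PySem.List.pyGet? char_array (-1)).getD []).filter (fun c => c ≠ " ")
  (PySem.List.enumerate operations).foldl
    (fun answer x =>
      let col := num_2d_array.map (fun row => PySem.List.pyGetD row x.1 0)  -- row[i]; Pre_ makes it in range
      if x.2 = "+" then answer + col.sum
      else if x.2 = "*" then answer + pyProduct col
      else answer) 0

-- ===== PORT B =====
def easy_puzzle_alt (char_array : List (List String)) : Int :=
  let ops := ((PySem.List.pyGet? char_array (-1)).getD []).filter (fun c => c ≠ " ")
  let acc0 : List Int := ops.map (fun op => if op = "+" then 0 else 1)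
  let accF :=
    (PySem.List.slice char_array none (some (-1))).foldl
      (fun acc line =>
        let nums := (PySem.Str.split₀ (PySem.Str.join "" line)).map
          (fun s => (PySem.Int.ofStr? s).getD 0)
        (PySem.List.enumerate (acc.zip ops)).map
          (fun x =>
            if x.2.2 = "+" then x.2.1 + PySem.List.pyGetD nums x.1 0
            else if x.2.2 = "*" then x.2.1 * PySem.List.pyGetD nums x.1 0
            else x.2.1)) acc0
  (accF.zip ops).foldl (fun s x => if x.2 = "+" || x.2 = "*" then s + x.1 else s) 0

-- ===== PRECONDITION & SPEC =====
-- Pre_ excludes exactly the inputs on which Python A raises: an empty grid (IndexError on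
-- char_array[-1]), a token int() rejects (ValueError), and a number row with fewer tokens than
-- the operation row has non-space entries (IndexError on row[i]).
def Pre_easy_puzzle (char_array : List (List String)) : Prop :=
  char_array ≠ [] ∧
  ∀ line ∈ char_array.dropLast,
    (∀ s ∈ PySem.Str.split₀ (PySem.Str.join "" line), (PySem.Int.ofStr? s).isSome = true) ∧
    ((char_array.getLast?.getD []).filter (fun c => c ≠ " ")).length ≤
      (PySem.Str.split₀ (PySem.Str.join "" line)).length
instance (char_array : List (List String)) : Decidable (Pre_easy_puzzle char_array) := by
  unfold Pre_easy_puzzle; infer_instance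

def pvWitness_easy_puzzle : List (List String) :=
  [["1", " ", "2"], ["3", " ", "4"], ["+", " ", "*"]]

def Spec_easy_puzzle (char_array : List (List String)) (out : Int) : Prop := out = easy_puzzle_alt char_array
instance (char_array : List (List String)) (out : Int) : Decidable (Spec_easy_puzzle char_array out) := by unfold Spec_easy_puzzle; infer_instance

-- ===== CLAIM (what is proved, stated in full; the proofs are below) =====
def Claim_equal_easy_puzzle : Prop := ∀ (char_array : List (List String)), Dom_easy_puzzle char_array → Pre_easy_puzzle char_array → Spec_easy_puzzle char_array (easy_puzzle char_array)

-- ===== LEMMAS AND PROOFS =====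

-- ----- proof-only helpers -----
def pvColAt (rows : List (List Int)) (i : Int) : List Int :=
  rows.map (fun row => PySem.List.pyGetD row i 0)

def pvColred (rows : List (List Int)) (i : Int) (op : String) (a : Int) : Int :=
  if op = "+" then a + (pvColAt rows i).sum
  else if op = "*" then a * pyProduct (pvColAt rows i)
  else a

def pvStep (ops : List String) (acc nums : List Int) : List Int :=
  (PySem.List.enumerate (acc.zip ops)).map
    (fun x =>
      if x.2.2 = "+" then x.2.1 + PySem.List.pyGetD nums x.1 0
      else if x.2.2 = "*" then x.2.1 * PySem.List.pyGetD nums x.1 0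
      else x.2.1)

theorem pv_foldl_mul (l : List Int) (a : Int) :
    l.foldl (fun p n => p * n) a = a * l.foldl (fun p n => p * n) 1 := by
  induction l generalizing a with
  | nil => simp
  | cons x l ih => simp only [List.foldl_cons]; rw [ih (a * x), ih (1 * x)]; ring

theorem pyProduct_cons (v : Int) (l : List Int) : pyProduct (v :: l) = v * pyProduct l := by
  simp only [pyProduct, List.foldl_cons]; rw [pv_foldl_mul l (1 * v)]; ring

theorem pvStep_len (ops : List String) (acc nums : List Int) (h : acc.length = ops.length) :
    (pvStep ops acc nums).length = ops.length := by
  simp [pvStep, PySem.List.length_enumerate, h]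

theorem pv_fold_len (ops : List String) (rows : List (List Int)) :
    ∀ acc : List Int, acc.length = ops.length →
      (rows.foldl (pvStep ops) acc).length = ops.length := by
  induction rows with
  | nil => intro acc h; simpa using h
  | cons nums rows ih =>
      intro acc h
      simp only [List.foldl_cons]
      exact ih _ (pvStep_len ops acc nums h)

theorem pv_fold_get (ops : List String) (rows : List (List Int)) :
    ∀ (acc : List Int) (h : acc.length = ops.length) (k : Nat) (hk : k < ops.length),
      (rows.foldl (pvStep ops) acc)[k]'(by rw [pv_fold_len ops rows acc h]; exact hk)
        = pvColred rows k (ops[k]'hk) (acc[k]'(by omega)) := by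
  induction rows with
  | nil =>
      intro acc h k hk
      simp only [List.foldl_nil, pvColred, pvColAt, List.map_nil]
      split_ifs <;> first | rfl | simp [pyProduct]
  | cons nums rows ih =>
      intro acc h k hk
      have hstep := pvStep_len ops acc nums h
      simp only [List.foldl_cons]
      rw [ih (pvStep ops acc nums) hstep k hk]
      have hk' : k < acc.length := by omega
      have hzip : k < (acc.zip ops).length := by simp [List.length_zip]; omega
      have hget : (pvStep ops acc nums)[k]'(by rw [hstep]; exact hk)
          = (if (ops[k]'hk) = "+" then acc[k]'hk' + PySem.List.pyGetD nums (0 + (k:Int)) 0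
             else if (ops[k]'hk) = "*" then acc[k]'hk' * PySem.List.pyGetD nums (0 + (k:Int)) 0
             else acc[k]'hk') := by
        simp [pvStep, PySem.List.getElem_enumerate, List.getElem_zip]
      rw [hget]
      have hcol : pvColAt (nums :: rows) (k : Int)
          = PySem.List.pyGetD nums (k : Int) 0 :: pvColAt rows (k : Int) := by
        simp [pvColAt]
      simp only [pvColred, hcol, List.sum_cons, pyProduct_cons, zero_add]
      split_ifs <;> ring

theorem pv_main (ops : List String) (rows : List (List Int)) :
    ((rows.foldl (pvStep ops) (ops.map (fun op => if op = "+" then (0:Int) else 1))).zip ops).foldl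
        (fun s x => if x.2 = "+" || x.2 = "*" then s + x.1 else s) 0
      = (PySem.List.enumerate ops).foldl
          (fun answer x =>
            if x.2 = "+" then answer + (pvColAt rows x.1).sum
            else if x.2 = "*" then answer + pyProduct (pvColAt rows x.1)
            else answer) 0 := by
  have hacc0 : (ops.map (fun op => if op = "+" then (0:Int) else 1)).length = ops.length := by simp
  have hlenF := pv_fold_len ops rows _ hacc0
  have hB : (fun (s : Int) (x : Int × String) => if x.2 = "+" || x.2 = "*" then s + x.1 else s)
      = fun s x => s + (if x.2 = "+" || x.2 = "*" then x.1 else 0) := by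
    funext s x; split_ifs <;> ring
  have hA : (fun (answer : Int) (x : Int × String) =>
        if x.2 = "+" then answer + (pvColAt rows x.1).sum
        else if x.2 = "*" then answer + pyProduct (pvColAt rows x.1)
        else answer)
      = fun answer x => answer + (if x.2 = "+" then (pvColAt rows x.1).sum
          else if x.2 = "*" then pyProduct (pvColAt rows x.1) else 0) := by
    funext answer x; split_ifs <;> ring
  rw [hB, hA, PySem.List.foldl_add, PySem.List.foldl_add]
  congr 1
  apply congrArg
  apply List.ext_getElem
  · simp [PySem.List.length_enumerate, List.length_zip, hlenF]
  · intro k hka hkb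
    have hk : k < ops.length := by
      simpa [PySem.List.length_enumerate] using hkb
    simp only [List.getElem_map, List.getElem_zip, PySem.List.getElem_enumerate]
    rw [pv_fold_get ops rows _ hacc0 k hk]
    have : (ops.map (fun op => if op = "+" then (0:Int) else 1))[k]'(by simpa using hk)
        = (if (ops[k]'hk) = "+" then (0:Int) else 1) := by simp
    rw [this]
    simp only [pvColred, zero_add]
    by_cases hp : (ops[k]'hk) = "+" <;> by_cases hm : (ops[k]'hk) = "*" <;>
      simp [hp, hm]

-- ===== VERDICT =====

theorem easy_puzzle_spec : Claim_equal_easy_puzzle := by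
  intro ca _ _
  show easy_puzzle ca = easy_puzzle_alt ca
  have hA : easy_puzzle ca
      = (PySem.List.enumerate (((PySem.List.pyGet? ca (-1)).getD []).filter (fun c => c ≠ " "))).foldl
          (fun answer x =>
            if x.2 = "+" then answer + (pvColAt (ca.dropLast.map (fun line => (PySem.Str.split₀ (PySem.Str.join "" line)).map (fun s => (PySem.Int.ofStr? s).getD 0))) x.1).sum
            else if x.2 = "*" then answer + pyProduct (pvColAt (ca.dropLast.map (fun line => (PySem.Str.split₀ (PySem.Str.join "" line)).map (fun s => (PySem.Int.ofStr? s).getD 0))) x.1)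
            else answer) 0 := by
    simp only [easy_puzzle]
    rw [PySem.List.slice_to_neg_one, PySem.List.foldl_append_singleton_eq_map, List.nil_append]
    rfl
  have hB : easy_puzzle_alt ca
      = (((ca.dropLast.map (fun line => (PySem.Str.split₀ (PySem.Str.join "" line)).map (fun s => (PySem.Int.ofStr? s).getD 0))).foldl
            (pvStep (((PySem.List.pyGet? ca (-1)).getD []).filter (fun c => c ≠ " ")))
            ((((PySem.List.pyGet? ca (-1)).getD []).filter (fun c => c ≠ " ")).map (fun op => if op = "+" then (0:Int) else 1))).zip
          (((PySem.List.pyGet? ca (-1)).getD []).filter (fun c => c ≠ " "))).foldl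
          (fun s x => if x.2 = "+" || x.2 = "*" then s + x.1 else s) 0 := by
    simp only [easy_puzzle_alt]
    rw [PySem.List.slice_to_neg_one, List.foldl_map]
    rfl
  rw [hA, hB]
  exact (pv_main (((PySem.List.pyGet? ca (-1)).getD []).filter (fun c => c ≠ " "))
    (ca.dropLast.map (fun line => (PySem.Str.split₀ (PySem.Str.join "" line)).map (fun s => (PySem.Int.ofStr? s).getD 0)))).symm
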